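-- pv_equiv track=rewrite | github.com/bharadwajvaduguru8/leetcode | 5185question.py | nums1
-- ===== SOURCE A (Python) =====
-- def nums1(arr):
--     p=0
--     for a in range(0,len(arr)-2):
--         if arr[a]%2!=0 and arr[a+1]%2!=0 and arr[a+2]%2!=0:
--             p=1
--         else:
--             pass
--     return(str(bool(p)).lower())
-- ===== SOURCE B (Python) =====
-- def nums1(arr):
--     run = 0
--     found = False
--     for x in arr:
--         if x % 2 != 0:
--             run += 1
--             if run >= 3:
--                 found = True
--         else:
--             run = 0
--     return str(found).lower()
-- ===== Notes on version B (the rewrite author's own statement) =====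
-- stated objective: alternative
-- what changed: Replaces the fixed-window triple check arr[a]/arr[a+1]/arr[a+2] over all window start indices with a single pass over the elements that maintains a run-length counter of consecutive odd values and sets a flag when the run reaches 3.
import Mathlib
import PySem

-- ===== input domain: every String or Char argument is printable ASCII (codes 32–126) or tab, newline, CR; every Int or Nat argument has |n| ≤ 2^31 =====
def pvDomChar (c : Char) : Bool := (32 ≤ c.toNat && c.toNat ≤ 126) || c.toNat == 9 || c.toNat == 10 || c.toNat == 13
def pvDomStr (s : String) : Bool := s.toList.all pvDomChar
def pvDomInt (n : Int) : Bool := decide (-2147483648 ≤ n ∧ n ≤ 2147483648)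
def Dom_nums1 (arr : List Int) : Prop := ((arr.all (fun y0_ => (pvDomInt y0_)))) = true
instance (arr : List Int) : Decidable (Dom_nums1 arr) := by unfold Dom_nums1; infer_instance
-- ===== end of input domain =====

-- B replaces A's scan over all window start indices (three indexed reads each) by a single
-- element-wise pass maintaining a run-length counter of consecutive odd values (objective: alternative).

-- x % 2 != 0 (Python % semantics)
def pvOdd (x : Int) : Bool := decide (PySem.Int.mod x 2 ≠ 0)

-- ===== PORT A =====
-- indices produced by range(0, len(arr)-2) are always in range, so pyGetD with default 0 is exact here
def nums1 (arr : List Int) : String :=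
  let p : Int :=
    (PySem.List.pyRange 0 ((arr.length : Int) - 2) 1).foldl
      (fun p a =>
        if pvOdd (PySem.List.pyGetD arr a 0) && pvOdd (PySem.List.pyGetD arr (a + 1) 0)
            && pvOdd (PySem.List.pyGetD arr (a + 2) 0) then 1 else p)
      0
  if p == 0 then "false" else "true"   -- str(bool(p)).lower()

-- ===== PORT B =====
def pvAltLoop : List Int → Int → Bool → Bool
  | [], _, found => found
  | x :: xs, run, found =>
      if pvOdd x then
        pvAltLoop xs (run + 1) (if 3 ≤ run + 1 then true else found)
      else
        pvAltLoop xs 0 found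

def nums1_alt (arr : List Int) : String :=
  if pvAltLoop arr 0 false then "true" else "false"   -- str(found).lower()

-- ===== PRECONDITION & SPEC =====
def Spec_nums1 (arr : List Int) (out : String) : Prop := out = nums1_alt arr
instance (arr : List Int) (out : String) : Decidable (Spec_nums1 arr out) := by unfold Spec_nums1; infer_instance

-- ===== CLAIM (what is proved, stated in full; the proofs are below) =====
def Claim_equal_nums1 : Prop := ∀ (arr : List Int), Dom_nums1 arr → Spec_nums1 arr (nums1 arr)

-- ===== LEMMAS AND PROOFS =====

-- odd test on arr[i] (i a Nat index, default 0)
def pvOddIdx (arr : List Int) (i : Nat) : Bool := pvOdd (arr.getD i 0)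

-- window spec: some window of three consecutive odds exists
def pvTri : List Int → Bool
  | a :: b :: c :: rest => (pvOdd a && pvOdd b && pvOdd c) || pvTri (b :: c :: rest)
  | _ => false

def pvPref1 : List Int → Bool
  | a :: _ => pvOdd a
  | [] => false

def pvPref2 : List Int → Bool
  | a :: b :: _ => pvOdd a && pvOdd b
  | _ => false

def pvG : List Int → Int → Bool
  | [], _ => false
  | x :: xs, run => if pvOdd x then (decide (3 ≤ run + 1) || pvG xs (run + 1)) else pvG xs 0

lemma pvAltLoop_eq_found_or (xs : List Int) : ∀ (run : Int) (found : Bool),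
    pvAltLoop xs run found = (found || pvG xs run) := by
  induction xs with
  | nil => intro run found; simp [pvAltLoop, pvG]
  | cons x xs ih =>
    intro run found
    by_cases hx : pvOdd x = true
    · simp [pvAltLoop, pvG, hx, ih]
      by_cases h3 : (3:Int) ≤ run + 1 <;> simp [h3]
    · simp [pvAltLoop, pvG, hx, ih]

lemma pvTri_cons (x : Int) (xs : List Int) :
    pvTri (x :: xs) = ((pvOdd x && pvPref2 xs) || pvTri xs) := by
  match xs with
  | [] => simp [pvTri, pvPref2]
  | [b] => simp [pvTri, pvPref2]
  | b :: c :: rest => simp [pvTri, pvPref2, Bool.and_assoc]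

lemma pvG_eq (xs : List Int) : ∀ (run : Int), 0 ≤ run →
    pvG xs run = (pvTri xs || (decide (2 ≤ run) && pvPref1 xs) || (decide (1 ≤ run) && pvPref2 xs)) := by
  induction xs with
  | nil => intro run _; simp [pvG, pvTri, pvPref1, pvPref2]
  | cons x xs ih =>
    intro run hrun
    by_cases hx : pvOdd x = true
    · have h1 : decide ((3:Int) ≤ run + 1) = decide ((2:Int) ≤ run) := by
        by_cases h : (2:Int) ≤ run <;> simp [h] <;> omega
      have h2 : decide ((2:Int) ≤ run + 1) = decide ((1:Int) ≤ run) := by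
        by_cases h : (1:Int) ≤ run <;> simp [h] <;> omega
      have h3 : decide ((1:Int) ≤ run + 1) = true := by simp; omega
      rw [pvG, if_pos hx, ih (run + 1) (by omega), pvTri_cons, h1, h2, h3]
      cases xs with
      | nil => simp [pvPref1, pvPref2, pvTri, hx, Bool.or_comm]
      | cons b ys =>
        simp only [pvPref1, pvPref2, hx, Bool.true_and, Bool.or_assoc]
        cases ys with
        | nil => simp [pvTri, Bool.or_comm]
        | cons c zs =>
          simp only []
          cases pvOdd b <;> cases pvOdd c <;> cases pvTri (b :: c :: zs) <;>
            cases decide ((2:Int) ≤ run) <;> cases decide ((1:Int) ≤ run) <;> simp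
    · rw [pvG, if_neg hx, ih 0 le_rfl, pvTri_cons]
      simp only [Bool.not_eq_true] at hx
      simp [hx]
      cases xs <;> simp [pvPref1, pvPref2, hx]

lemma pvAltLoop_eq_pvTri (arr : List Int) : pvAltLoop arr 0 false = pvTri arr := by
  rw [pvAltLoop_eq_found_or, pvG_eq arr 0 le_rfl]
  simp

lemma foldl_if_one (l : List Int) (c : Int → Bool) : ∀ (init : Int),
    l.foldl (fun p a => if c a then 1 else p) init = if l.any c then 1 else init := by
  induction l with
  | nil => intro init; simp
  | cons x xs ih =>
    intro init
    by_cases hx : c x = true <;> simp [List.foldl_cons, hx, ih]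

lemma pvTri_iff (arr : List Int) : pvTri arr = true ↔
    ∃ k, k + 2 < arr.length ∧ pvOddIdx arr k = true ∧ pvOddIdx arr (k+1) = true ∧ pvOddIdx arr (k+2) = true := by
  induction arr with
  | nil => simp [pvTri]
  | cons x xs ih =>
    rw [pvTri_cons]
    constructor
    · intro h
      rcases Bool.or_eq_true_iff.mp h with h | h
      · rcases Bool.and_eq_true_iff.mp h with ⟨hx, hp⟩
        cases xs with
        | nil => simp [pvPref2] at hp
        | cons b ys =>
          cases ys with
          | nil => simp [pvPref2] at hp
          | cons c zs =>
            rcases Bool.and_eq_true_iff.mp hp with ⟨hb, hc⟩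
            exact ⟨0, by simp only [List.length_cons]; omega, by simpa [pvOddIdx] using hx,
              by simpa [pvOddIdx] using hb, by simpa [pvOddIdx] using hc⟩
      · rcases ih.mp h with ⟨k, hk, h0, h1, h2⟩
        exact ⟨k + 1, by simp [List.length_cons]; omega, by simpa [pvOddIdx] using h0,
          by simpa [pvOddIdx] using h1, by simpa [pvOddIdx] using h2⟩
    · rintro ⟨k, hk, h0, h1, h2⟩
      cases k with
      | zero =>
        apply Bool.or_eq_true_iff.mpr; left
        cases xs with
        | nil => simp at hk
        | cons b ys =>
          cases ys with
          | nil => simp [List.length_cons] at hk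
          | cons c zs =>
            simp only [pvOddIdx, List.getD] at h0 h1 h2
            simp_all [pvPref2, pvOddIdx]
      | succ k' =>
        apply Bool.or_eq_true_iff.mpr; right
        exact ih.mpr ⟨k', by simp only [List.length_cons] at hk; omega, by simpa [pvOddIdx] using h0,
          by simpa [pvOddIdx] using h1, by simpa [pvOddIdx] using h2⟩

lemma nums1_any (arr : List Int) :
    ((PySem.List.pyRange 0 ((arr.length : Int) - 2) 1).any
      (fun a => pvOdd (PySem.List.pyGetD arr a 0) && pvOdd (PySem.List.pyGetD arr (a + 1) 0)
          && pvOdd (PySem.List.pyGetD arr (a + 2) 0))) = pvTri arr := by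
  rw [PySem.List.pyRange_one]
  simp only [List.any_map, Function.comp_def, zero_add]
  have hnat : ((arr.length : Int) - 2 - 0).toNat = arr.length - 2 := by omega
  rw [hnat]
  rcases Bool.eq_false_or_eq_true (pvTri arr) with ht | ht
  all_goals rw [ht]
  · rw [List.any_eq_true]
    rcases (pvTri_iff arr).mp ht with ⟨k, hk, h0, h1, h2⟩
    refine ⟨k, List.mem_range.mpr (by omega), ?_⟩
    have e1 : (k:Int) + 1 = ((k+1 : Nat) : Int) := by push_cast; ring
    have e2 : (k:Int) + 2 = ((k+2 : Nat) : Int) := by push_cast; ring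
    rw [e1, e2]
    simp only [PySem.List.pyGetD_natCast]
    simp_all [pvOddIdx]
  · rw [List.any_eq_false]
    intro k hk
    have hk' : k + 2 < arr.length := by
      have := List.mem_range.mp hk; omega
    intro hcond
    have e1 : (k:Int) + 1 = ((k+1 : Nat) : Int) := by push_cast; ring
    have e2 : (k:Int) + 2 = ((k+2 : Nat) : Int) := by push_cast; ring
    rw [e1, e2] at hcond
    simp only [PySem.List.pyGetD_natCast] at hcond
    rcases Bool.and_eq_true_iff.mp hcond with ⟨h01, h2⟩
    rcases Bool.and_eq_true_iff.mp h01 with ⟨h0, h1⟩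
    have : pvTri arr = true :=
      (pvTri_iff arr).mpr ⟨k, hk', by simpa [pvOddIdx] using h0,
        by simpa [pvOddIdx] using h1, by simpa [pvOddIdx] using h2⟩
    rw [ht] at this; exact absurd this (by simp)

-- ===== VERDICT (by name: the statement is the Claim_ definition above) =====
theorem nums1_spec : Claim_equal_nums1 := by
  intro arr _
  unfold Spec_nums1 nums1 nums1_alt
  rw [foldl_if_one, nums1_any, pvAltLoop_eq_pvTri]
  rcases Bool.eq_false_or_eq_true (pvTri arr) with h | h <;> rw [h] <;> simp
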